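-- pv_equiv track=rewrite | github.com/wseungjin/codingTest | kakao/2020kakaoBlind/외벽점검-greedy.py | solution
-- ===== SOURCE A (Python) =====
-- def getNextIndex(i,j, length):
--     nextIndex = i + j - 1
--     if nextIndex >= length:
--         nextIndex -= length
--     return nextIndex
--
-- def setTrue(visited,startIndex,endIndex):
--     if endIndex >= len(visited):
--         for i in range(startIndex,len(visited)):
--             visited[i] = True
--         for i in range(0,endIndex - len(visited)):
--             visited[i] = True
--     else:
--         for i in range(startIndex,endIndex):
--             visited[i] = True
--
-- def isOK(visited,startIndex,endIndex):
--     if endIndex >= len(visited):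
--         for i in range(startIndex,len(visited)):
--             if(visited[i] == True):
--                 return False
--         for i in range(0,endIndex - len(visited)):
--             if(visited[i] == True):
--                 return False
--     else:
--         for i in range(startIndex,endIndex):
--             if(visited[i] == True):
--                 return False
--     return True
--
-- def solution(n, weak, dist):
--
--     dist = sorted(dist)
--
--     weakLen = len(weak)
--
--     weakDist = []
--
--     answer = 0
--
--     for i in range(weakLen-1):
--         weakDist.append(weak[i+1] - weak[i])
--
--     weakDist.append(weak[0] + n - weak[weakLen-1])
--
--     sumDist = [[0 for i in range(weakLen)] for j in range(weakLen)]
--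
--     for i in range(weakLen):
--         for j in range(1,weakLen):
--             nextIndex = getNextIndex(i,j,weakLen)
--             sumDist[i][j] = sumDist[i][j-1] + weakDist[nextIndex]
--
--     visited = [False] * weakLen
--
--     for length in range(weakLen-1,-1,-1):
--         for d in dist:
--             for i in range(weakLen):
--                 if sumDist[i][length] <= d and isOK(visited,i,i+length+1):
--                     setTrue(visited,i,i+length+1)
--                     answer += 1
--                     break
--
--     for v in visited:
--         if v == False:
--             return -1
--     return answer
-- ===== SOURCE B (Python) =====
-- def solution(n, weak, dist):
--     L = len(weak)
--     gaps = [weak[i + 1] - weak[i] for i in range(L - 1)]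
--     gaps.append(weak[0] + n - weak[L - 1])
--     friends = sorted(dist)
--     covered = set()
--     answer = 0
--     for length in range(L - 1, -1, -1):
--         # circular window sums by a rolling update; candidates ordered by cost
--         s = sum(gaps[:length])
--         cand = []
--         for i in range(L):
--             cand.append((s, i))
--             s += gaps[(i + length) % L] - gaps[i]
--         cand.sort(key=lambda c: c[0])
--         eligible = []
--         for d in friends:
--             while cand and cand[0][0] <= d:
--                 eligible.append(cand.pop(0)[1])
--             free = [i for i in eligible
--                     if all((i + k) % L not in covered for k in range(length + 1))]
--             if free:
--                 i = min(free)
--                 for k in range(length + 1):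
--                     covered.add((i + k) % L)
--                 answer += 1
--     return answer if len(covered) == L else -1
-- ===== Notes on version B (the rewrite author's own statement) =====
-- stated objective: alternative
-- what changed: B replaces A's precomputed O(L^2) pairwise sum table, per-friend index-order rescans of all L starts and per-element boolean-array window scans by rolling circular window sums, candidate starts sorted by cost and consumed with a monotone pop-while pointer as the sorted distances ascend (a two-pointer merge), each placement chosen as the minimum index among currently-eligible free candidates, with coverage kept as a set.
import Mathlib
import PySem

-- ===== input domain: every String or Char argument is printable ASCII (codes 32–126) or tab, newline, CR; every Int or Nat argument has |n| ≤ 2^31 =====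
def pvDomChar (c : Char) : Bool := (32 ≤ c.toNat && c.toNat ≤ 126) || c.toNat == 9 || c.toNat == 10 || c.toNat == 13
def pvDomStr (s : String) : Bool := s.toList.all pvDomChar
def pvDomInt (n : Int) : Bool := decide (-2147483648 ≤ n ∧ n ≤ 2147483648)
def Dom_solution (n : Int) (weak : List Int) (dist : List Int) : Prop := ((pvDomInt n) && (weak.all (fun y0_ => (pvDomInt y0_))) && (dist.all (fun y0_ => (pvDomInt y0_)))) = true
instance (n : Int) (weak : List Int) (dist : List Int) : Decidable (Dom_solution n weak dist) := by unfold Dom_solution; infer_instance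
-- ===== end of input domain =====

-- B replaces A's precomputed O(L^2) sum table and per-friend index-order rescans of all starts
-- (with per-element boolean-array window scans) by rolling window sums, candidate starts sorted
-- by cost consumed with a monotone pop-while pointer as the sorted distances ascend, placement
-- chosen as the minimum index among eligible free candidates, coverage kept as a set (objective: alternative).

-- ===== PORT A =====
def getNextIndex (i j length : Nat) : Nat :=
  let nextIndex := i + j - 1
  if nextIndex ≥ length then nextIndex - length else nextIndex

def setTrue (visited : List Bool) (startIndex endIndex : Nat) : List Bool :=
  if endIndex ≥ visited.length then
    let v1 := (List.range' startIndex (visited.length - startIndex)).foldl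
      (fun v i => v.set i true) visited
    (List.range (endIndex - visited.length)).foldl (fun v i => v.set i true) v1
  else
    (List.range' startIndex (endIndex - startIndex)).foldl (fun v i => v.set i true) visited

def isOK (visited : List Bool) (startIndex endIndex : Nat) : Bool :=
  if endIndex ≥ visited.length then
    (List.range' startIndex (visited.length - startIndex)).all (fun i => !(visited.getD i false)) &&
    (List.range (endIndex - visited.length)).all (fun i => !(visited.getD i false))
  else
    (List.range' startIndex (endIndex - startIndex)).all (fun i => !(visited.getD i false))

def solution (n : Int) (weak : List Int) (dist : List Int) : Int :=
  let dist := PySem.List.sorted dist (fun x => x) false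
  let weakLen := weak.length
  let weakDist := (List.range (weakLen - 1)).foldl
      (fun wd i => wd ++ [weak.getD (i+1) 0 - weak.getD i 0]) []
  let weakDist := weakDist ++ [weak.getD 0 0 + n - weak.getD (weakLen - 1) 0]
  let sumDist := (List.range weakLen).map (fun _ => (List.range weakLen).map (fun _ => (0:Int)))
  let sumDist := (List.range weakLen).foldl (fun sd i =>
      (List.range' 1 (weakLen - 1)).foldl (fun sd j =>
        let nextIndex := getNextIndex i j weakLen
        sd.set i ((sd.getD i []).set j
          (((sd.getD i []).getD (j-1) 0) + weakDist.getD nextIndex 0))) sd) sumDist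
  let visited := List.replicate weakLen false
  let st := ((List.range weakLen).reverse).foldl (fun (st : List Bool × Int) length =>
      dist.foldl (fun (st : List Bool × Int) d =>
        match (List.range weakLen).find? (fun i =>
            decide ((sumDist.getD i []).getD length 0 ≤ d) && isOK st.1 i (i + length + 1)) with
        | some i => (setTrue st.1 i (i + length + 1), st.2 + 1)
        | none => st) st) (visited, 0)
  if st.1.any (fun v => v == false) then -1 else st.2

-- ===== PORT B =====
-- the `while cand and cand[0][0] <= d: eligible.append(cand.pop(0)[1])` loop of Source B
def popWhileLe (cand : List (Int × Nat)) (eligible : List Nat) (d : Int) :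
    List (Int × Nat) × List Nat :=
  match cand with
  | [] => ([], eligible)
  | c :: rest => if c.1 ≤ d then popWhileLe rest (eligible ++ [c.2]) d else (c :: rest, eligible)

def solution_alt (n : Int) (weak : List Int) (dist : List Int) : Int :=
  let L := weak.length
  let gaps := ((List.range (L - 1)).map (fun i => weak.getD (i+1) 0 - weak.getD i 0))
              ++ [weak.getD 0 0 + n - weak.getD (L - 1) 0]
  let friends := PySem.List.sorted dist (fun x => x) false
  let st := ((List.range L).reverse).foldl (fun (st : PySem.Set Nat × Int) (length : Nat) =>
      let s0 := (PySem.List.slice gaps none (some (length : Int))).sum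
      let cand := ((List.range L).foldl (fun (p : List (Int × Nat) × Int) i =>
          (p.1 ++ [(p.2, i)], p.2 + gaps.getD ((i + length) % L) 0 - gaps.getD i 0)) ([], s0)).1
      let cand := PySem.List.sorted cand (fun c => c.1) false
      let r := friends.foldl
          (fun (r : (List (Int × Nat) × List Nat) × PySem.Set Nat × Int) d =>
            let ce := popWhileLe r.1.1 r.1.2 d
            let free := ce.2.filter (fun i =>
                (List.range (length + 1)).all
                  (fun k => !(PySem.Set.contains r.2.1 ((i + k) % L))))
            match PySem.List.min? free (fun x => x) with
            | some i => (ce,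
                ((List.range (length + 1)).foldl
                  (fun cv k => PySem.Set.add cv ((i + k) % L)) r.2.1, r.2.2 + 1))
            | none => (ce, r.2)) ((cand, []), st)
      r.2) (PySem.Set.empty, 0)
  if PySem.Set.len st.1 == (L : Int) then st.2 else -1

-- ===== PRECONDITION & SPEC =====
-- Pre_ excludes only weak = [], on which A raises IndexError (weak[0]).
def Pre_solution (n : Int) (weak : List Int) (dist : List Int) : Prop := weak ≠ []
instance (n : Int) (weak : List Int) (dist : List Int) : Decidable (Pre_solution n weak dist) := by unfold Pre_solution; infer_instance

def pvWitness_solution : Int × List Int × List Int := (10, [1, 3, 4, 9], [1, 2])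

def Spec_solution (n : Int) (weak : List Int) (dist : List Int) (out : Int) : Prop := out = solution_alt n weak dist
instance (n : Int) (weak : List Int) (dist : List Int) (out : Int) : Decidable (Spec_solution n weak dist out) := by unfold Spec_solution; infer_instance

-- ===== CLAIM (what is proved, stated in full; the proofs are below) =====
def Claim_equal_solution : Prop := ∀ (n : Int) (weak : List Int) (dist : List Int), Dom_solution n weak dist → Pre_solution n weak dist → Spec_solution n weak dist (solution n weak dist)

-- ===== LEMMAS AND PROOFS =====

lemma pvFoldlAppendMap {α β : Type} (f : α → β) :
    ∀ (l : List α) (acc : List β),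
      l.foldl (fun acc i => acc ++ [f i]) acc = acc ++ l.map f := by
  intro l
  induction l with
  | nil => intro acc; simp
  | cons x xs ih => intro acc; simp [List.foldl_cons, ih]

def pvSumS (wd : List Int) (L i j : Nat) : Int :=
  ((List.range j).map (fun k => wd.getD ((i + k) % L) 0)).sum

lemma pvSumSSucc (wd : List Int) (L i j : Nat) :
    pvSumS wd L i (j+1) = pvSumS wd L i j + wd.getD ((i + j) % L) 0 := by
  simp [pvSumS, List.range_succ]

lemma pvTakeSumSucc (l : List Int) (m : Nat) (h : m < l.length) :
    (l.take (m+1)).sum = (l.take m).sum + l.getD m 0 := by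
  have h2 : List.take (m+1) l = List.take m l ++ [l[m]] := by
    rw [List.take_add_one, List.getElem?_eq_getElem h]; rfl
  rw [h2, List.getD_eq_getElem l 0 h, List.sum_append]
  simp

lemma pvGetNextIndexMod (i j L : Nat) (hi : i < L) (_hj1 : 1 ≤ j) (hj : j < L) :
    getNextIndex i j L = (i + j - 1) % L := by
  simp only [getNextIndex]
  split
  · next h => rw [Nat.mod_eq_sub_mod h, Nat.mod_eq_of_lt (by omega)]
  · next h => rw [Nat.mod_eq_of_lt (by omega)]

lemma pvFoldlSetLength {α : Type} (f : List α → Nat → α) :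
    ∀ (js : List Nat) (l : List α),
      (js.foldl (fun r j => r.set j (f r j)) l).length = l.length := by
  intro js
  induction js with
  | nil => intro l; rfl
  | cons j js ih => intro l; rw [List.foldl_cons, ih, List.length_set]

def pvRow (wd : List Int) (L i : Nat) (r0 : List Int) (js : List Nat) : List Int :=
  js.foldl (fun r j => r.set j ((r.getD (j-1) 0) + wd.getD (getNextIndex i j L) 0)) r0

lemma pvMatrixInner (wd : List Int) (L i : Nat) :
    ∀ (js : List Nat) (sd : List (List Int)),
      js.foldl (fun sd j => sd.set i ((sd.getD i []).set j
          (((sd.getD i []).getD (j-1) 0) + wd.getD (getNextIndex i j L) 0))) sd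
        = sd.set i (pvRow wd L i (sd.getD i []) js) := by
  intro js
  induction js with
  | nil =>
      intro sd
      by_cases h : i < sd.length
      · simp only [List.foldl_nil, pvRow]
        rw [List.getD_eq_getElem sd [] h, List.set_getElem_self]
      · simp only [List.foldl_nil, pvRow]
        rw [List.set_eq_of_length_le (by omega)]
  | cons j js ih =>
      intro sd
      simp only [List.foldl_cons]
      rw [ih]
      by_cases h : i < sd.length
      · have hrow : (sd.set i ((sd.getD i []).set j
            (((sd.getD i []).getD (j-1) 0) + wd.getD (getNextIndex i j L) 0))).getD i []
            = (sd.getD i []).set j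
              (((sd.getD i []).getD (j-1) 0) + wd.getD (getNextIndex i j L) 0) := by
          rw [List.getD_eq_getElem?_getD, List.getElem?_set_self h]; rfl
        rw [hrow, List.set_set]
        simp only [pvRow, List.foldl_cons]
      · have hset : ∀ (r : List Int), sd.set i r = sd := fun r =>
          List.set_eq_of_length_le (by omega)
        rw [hset, hset, hset]

lemma pvMatrixOuter (H : Nat → List Int → List Int) :
    ∀ (js : List Nat), js.Nodup → ∀ (sd : List (List Int)) (i0 : Nat), i0 < sd.length →
      (js.foldl (fun sd i => sd.set i (H i (sd.getD i []))) sd).getD i0 []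
        = if i0 ∈ js then H i0 (sd.getD i0 []) else sd.getD i0 [] := by
  intro js
  induction js with
  | nil => intro _ sd i0 _; simp
  | cons j js ih =>
      intro hnd sd i0 h
      have hjnotin : j ∉ js := (List.nodup_cons.mp hnd).1
      have hnd' : js.Nodup := (List.nodup_cons.mp hnd).2
      simp only [List.foldl_cons]
      rw [ih hnd' _ i0 (by simpa [List.length_set] using h)]
      by_cases hij : i0 = j
      · subst hij
        have h2 : (sd.set i0 (H i0 (sd.getD i0 []))).getD i0 [] = H i0 (sd.getD i0 []) := by
          rw [List.getD_eq_getElem?_getD, List.getElem?_set_self h]; rfl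
        rw [if_neg hjnotin, if_pos List.mem_cons_self, h2]
      · have hne : (sd.set j (H j (sd.getD j []))).getD i0 [] = sd.getD i0 [] := by
          rw [List.getD_eq_getElem?_getD, List.getElem?_set_ne (fun hh => hij hh.symm),
            ← List.getD_eq_getElem?_getD]
        rw [hne]
        simp [List.mem_cons, hij]

lemma pvRowGetD (wd : List Int) (L i : Nat) (hi : i < L) (r0 : List Int)
    (hlen : r0.length = L) (h0 : ∀ j, r0.getD j 0 = 0) :
    ∀ m, m ≤ L - 1 → ∀ j, j ≤ m →
      (pvRow wd L i r0 (List.range' 1 m)).getD j 0 = pvSumS wd L i j := by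
  intro m
  induction m with
  | zero =>
      intro _ j hj
      have : j = 0 := by omega
      subst this
      simp only [pvRow, List.range'_zero, List.foldl_nil, pvSumS, List.range_zero,
        List.map_nil, List.sum_nil]
      exact h0 0
  | succ m ih =>
      intro hm j hj
      have hrange : List.range' 1 (m+1) = List.range' 1 m ++ [m + 1] := by
        simpa [Nat.add_comm] using (List.range'_concat (step := 1) (s := 1) (n := m))
      rw [pvRow, hrange, List.foldl_append]
      simp only [List.foldl_cons, List.foldl_nil, Nat.add_sub_cancel]
      have hrowlen : (List.foldl (fun r j => r.set j ((r.getD (j-1) 0)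
          + wd.getD (getNextIndex i j L) 0)) r0 (List.range' 1 m)).length = L := by
        rw [pvFoldlSetLength]; exact hlen
      have hprev : (List.foldl (fun r j => r.set j ((r.getD (j-1) 0)
          + wd.getD (getNextIndex i j L) 0)) r0 (List.range' 1 m)).getD m 0
          = pvSumS wd L i m := by
        have := ih (by omega) m le_rfl
        rw [pvRow] at this
        exact this
      have hnext : getNextIndex i (m+1) L = (i + m) % L := by
        rw [pvGetNextIndexMod i (m+1) L hi (by omega) (by omega)]
        congr 1
      rw [hnext]
      by_cases hjm : j = m + 1
      · subst hjm
        rw [List.getD_eq_getElem?_getD, List.getElem?_set_self (by rw [hrowlen]; omega)]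
        simp only [Option.getD_some]
        rw [hprev, ← pvSumSSucc]
      · rw [List.getD_eq_getElem?_getD, List.getElem?_set_ne (by omega),
          ← List.getD_eq_getElem?_getD]
        have := ih (by omega) j (by omega)
        rw [pvRow] at this
        exact this

lemma pvZeroRowGetD (L j : Nat) : ((List.range L).map (fun _ => (0:Int))).getD j 0 = 0 := by
  by_cases h : j < L
  · rw [List.getD_eq_getElem _ _ (by simp [h])]; simp
  · rw [List.getD_eq_default _ _ (by simp; omega)]

lemma pvTableGetD (wd : List Int) (L : Nat) (i j : Nat) (hi : i < L) (hj : j ≤ L - 1) :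
    (((List.range L).foldl (fun sd i =>
        (List.range' 1 (L - 1)).foldl (fun sd j =>
          sd.set i ((sd.getD i []).set j
            (((sd.getD i []).getD (j-1) 0) + wd.getD (getNextIndex i j L) 0))) sd)
        ((List.range L).map (fun _ => (List.range L).map (fun _ => (0:Int))))).getD i []).getD j 0
      = pvSumS wd L i j := by
  have hstep : (fun (sd : List (List Int)) (i : Nat) =>
      (List.range' 1 (L - 1)).foldl (fun sd j =>
        sd.set i ((sd.getD i []).set j
          (((sd.getD i []).getD (j-1) 0) + wd.getD (getNextIndex i j L) 0))) sd)
      = fun sd i => sd.set i (pvRow wd L i (sd.getD i []) (List.range' 1 (L-1))) := by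
    funext sd i
    exact pvMatrixInner wd L i _ sd
  rw [hstep]
  have hout := pvMatrixOuter (fun i r => pvRow wd L i r (List.range' 1 (L-1)))
    (List.range L) List.nodup_range
    ((List.range L).map (fun _ => (List.range L).map (fun _ => (0:Int)))) i (by simp [hi])
  simp only [] at hout
  rw [hout]
  have hmem : i ∈ List.range L := by simpa using hi
  rw [if_pos hmem]
  have hrow0 : ((List.range L).map (fun _ => (List.range L).map (fun _ => (0:Int)))).getD i []
      = (List.range L).map (fun _ => (0:Int)) := by
    rw [List.getD_eq_getElem _ _ (by simp [hi])]; simp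
  rw [hrow0]
  exact pvRowGetD wd L i hi _ (by simp) (pvZeroRowGetD L) (L-1) le_rfl j hj

lemma pvWindowEq (L i len : Nat) (hi : i < L) (hlen : len < L) :
    (List.range (len+1)).map (fun k => (i + k) % L)
      = if i + len + 1 ≥ L then List.range' i (L - i) ++ List.range (i + len + 1 - L)
        else List.range' i (len + 1) := by
  split
  · next h =>
      apply List.ext_getElem
      · simp; omega
      · intro k h1 h2
        simp only [List.getElem_map, List.getElem_range]
        by_cases hk : k < L - i
        · rw [List.getElem_append_left (by simpa using hk)]
          have hik : i + k < L := by omega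
          simp [List.getElem_range', Nat.mod_eq_of_lt hik]
        · have hklen : k < len + 1 := by simpa using h1
          rw [List.getElem_append_right (by simpa using hk)]
          simp only [List.getElem_range, List.length_range']
          rw [Nat.mod_eq_sub_mod (by omega), Nat.mod_eq_of_lt (by omega)]
          omega
  · next h =>
      apply List.ext_getElem
      · simp
      · intro k h1 h2
        have hik : i + k < L := by simp at h1; omega
        simp [List.getElem_range', Nat.mod_eq_of_lt hik]

lemma pvIsOKWindow (v : List Bool) (L i len : Nat) (hv : v.length = L) (hi : i < L)
    (hlen : len < L) :
    isOK v i (i + len + 1)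
      = ((List.range (len+1)).map (fun k => (i + k) % L)).all (fun t => !(v.getD t false)) := by
  subst hv
  unfold isOK
  split
  · next h =>
      rw [pvWindowEq v.length i len hi hlen, if_pos h, List.all_append]
  · next h =>
      rw [pvWindowEq v.length i len hi hlen, if_neg h,
        show i + len + 1 - i = len + 1 by omega]

lemma pvSetTrueWindow (v : List Bool) (L i len : Nat) (hv : v.length = L) (hi : i < L)
    (hlen : len < L) :
    setTrue v i (i + len + 1)
      = ((List.range (len+1)).map (fun k => (i + k) % L)).foldl (fun v t => v.set t true) v := by
  subst hv
  unfold setTrue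
  split
  · next h =>
      rw [pvWindowEq v.length i len hi hlen, if_pos h, List.foldl_append]
  · next h =>
      rw [pvWindowEq v.length i len hi hlen, if_neg h,
        show i + len + 1 - i = len + 1 by omega]

lemma pvMarkLen : ∀ (ws : List Nat) (v : List Bool),
    (ws.foldl (fun v t => v.set t true) v).length = v.length := by
  intro ws
  induction ws with
  | nil => intro v; rfl
  | cons w ws ih => intro v; rw [List.foldl_cons, ih, List.length_set]

lemma pvMarkGetD : ∀ (ws : List Nat) (v : List Bool), (∀ w ∈ ws, w < v.length) → ∀ t,
    (ws.foldl (fun v t => v.set t true) v).getD t false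
      = (decide (t ∈ ws) || v.getD t false) := by
  intro ws
  induction ws with
  | nil => intro v _ t; simp
  | cons w ws ih =>
      intro v hb t
      simp only [List.foldl_cons]
      rw [ih (v.set w true)
        (fun x hx => by rw [List.length_set]; exact hb x (List.mem_cons_of_mem _ hx)) t]
      by_cases htw : t = w
      · subst htw
        have : (v.set t true).getD t false = true := by
          rw [List.getD_eq_getElem?_getD, List.getElem?_set_self (hb t List.mem_cons_self)]; rfl
        rw [this]
        simp [List.mem_cons]
      · have : (v.set w true).getD t false = v.getD t false := by
          rw [List.getD_eq_getElem?_getD, List.getElem?_set_ne (fun hh => htw hh.symm),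
            ← List.getD_eq_getElem?_getD]
        rw [this]
        simp [List.mem_cons, htw]

-- ===== B-side lemmas =====

lemma pvSumSCons (wd : List Int) (L i j : Nat) :
    pvSumS wd L i (j+1) = wd.getD (i % L) 0 + pvSumS wd L (i+1) j := by
  simp only [pvSumS, List.range_succ_eq_map, List.map_cons, List.map_map, List.sum_cons,
    Nat.add_zero]
  congr 1
  apply congrArg List.sum
  apply List.map_congr_left
  intro k _
  simp only [Function.comp, Nat.succ_eq_add_one]
  congr 2
  omega

lemma pvSumSRoll (wd : List Int) (L i len : Nat) (hi : i < L) :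
    pvSumS wd L (i+1) len = pvSumS wd L i len + wd.getD ((i + len) % L) 0 - wd.getD i 0 := by
  have h1 := pvSumSSucc wd L i len
  have h2 := pvSumSCons wd L i len
  rw [Nat.mod_eq_of_lt hi] at h2
  omega

lemma pvTakeSum (wd : List Int) (L : Nat) :
    ∀ m, m ≤ wd.length → m ≤ L → (wd.take m).sum = pvSumS wd L 0 m := by
  intro m
  induction m with
  | zero => intro _ _; simp [pvSumS]
  | succ m ih =>
      intro h1 h2
      rw [pvTakeSumSucc wd m (by omega), pvSumSSucc, ih (by omega) (by omega),
        Nat.zero_add, Nat.mod_eq_of_lt (by omega)]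

lemma pvCandFold (g : List Int) (L len : Nat) :
    ∀ m, m ≤ L →
      ((List.range m).foldl (fun (p : List (Int × Nat) × Int) i =>
          (p.1 ++ [(p.2, i)], p.2 + g.getD ((i + len) % L) 0 - g.getD i 0))
        ([], pvSumS g L 0 len))
      = ((List.range m).map (fun i => (pvSumS g L i len, i)), pvSumS g L m len) := by
  intro m
  induction m with
  | zero => intro _; simp
  | succ m ih =>
      intro h
      rw [List.range_succ, List.foldl_append, ih (by omega)]
      simp only [List.foldl_cons, List.foldl_nil, List.map_append, List.map_cons, List.map_nil]
      refine Prod.ext rfl ?_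
      simp only []
      rw [pvSumSRoll g L m len (by omega)]

lemma pvPopWhileLeSpec (d : Int) :
    ∀ (cand : List (Int × Nat)) (el : List Nat),
      popWhileLe cand el d
        = (cand.dropWhile (fun c => decide (c.1 ≤ d)),
           el ++ (cand.takeWhile (fun c => decide (c.1 ≤ d))).map Prod.snd) := by
  intro cand
  induction cand with
  | nil => intro el; simp [popWhileLe]
  | cons c rest ih =>
      intro el
      simp only [popWhileLe]
      by_cases h : c.1 ≤ d
      · rw [if_pos h, ih]
        simp [List.dropWhile_cons, List.takeWhile_cons, h]
      · rw [if_neg h]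
        simp [List.dropWhile_cons, List.takeWhile_cons, h]

lemma pvTakeWhileSplit {α : Type} (p q : α → Bool) (himp : ∀ a, p a = true → q a = true) :
    ∀ l : List α, l.takeWhile q = l.takeWhile p ++ (l.dropWhile p).takeWhile q := by
  intro l
  induction l with
  | nil => simp
  | cons a l ih =>
      by_cases hp : p a = true
      · have hq := himp a hp
        simp [List.takeWhile_cons, List.dropWhile_cons, hp, hq, ih]
      · simp [List.takeWhile_cons, List.dropWhile_cons, hp]

lemma pvDropWhileSplit {α : Type} (p q : α → Bool) (himp : ∀ a, p a = true → q a = true) :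
    ∀ l : List α, l.dropWhile q = (l.dropWhile p).dropWhile q := by
  intro l
  induction l with
  | nil => simp
  | cons a l ih =>
      by_cases hp : p a = true
      · have hq := himp a hp
        simp [List.dropWhile_cons, hp, hq, ih]
      · simp [List.dropWhile_cons, hp]

lemma pvTakeWhileEqFilter (d : Int) :
    ∀ l : List (Int × Nat), l.Pairwise (fun a b => a.1 ≤ b.1) →
      l.takeWhile (fun c => decide (c.1 ≤ d)) = l.filter (fun c => decide (c.1 ≤ d)) := by
  intro l
  induction l with
  | nil => intro _; rfl
  | cons a l ih =>
      intro hp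
      obtain ⟨ha, hp'⟩ := List.pairwise_cons.mp hp
      by_cases h : a.1 ≤ d
      · simp [List.takeWhile_cons, List.filter_cons, h, ih hp']
      · simp only [List.takeWhile_cons, List.filter_cons, decide_eq_true_eq]
        rw [if_neg h, if_neg h]
        symm
        rw [List.filter_eq_nil_iff]
        intro c hc
        simp only [decide_eq_true_eq]
        have := ha c hc
        omega

lemma pvFindEqHeadFilter {α : Type} (p : α → Bool) :
    ∀ l : List α, l.find? p = (l.filter p).head? := by
  intro l
  induction l with
  | nil => rfl
  | cons a l ih =>
      cases h : p a with
      | true =>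
          rw [List.find?_cons_of_pos h, List.filter_cons_of_pos h, List.head?_cons]
      | false =>
          rw [List.find?_cons_of_neg (by simp [h]), List.filter_cons_of_neg (by simp [h]), ih]

lemma pvFindCongr {α : Type} (p q : α → Bool) :
    ∀ l : List α, (∀ a ∈ l, p a = q a) → l.find? p = l.find? q := by
  intro l
  induction l with
  | nil => intro _; rfl
  | cons a l ih =>
      intro h
      have ha := h a List.mem_cons_self
      simp only [List.find?_cons, ha, ih (fun b hb => h b (List.mem_cons_of_mem _ hb))]

-- min over a list that is a permutation of a strictly increasing list is its head
lemma pvMinPerm (free F : List Nat) (hperm : free.Perm F) (hF : F.Pairwise (· < ·)) :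
    PySem.List.min? free (fun x => x) = F.head? := by
  cases hFc : F with
  | nil =>
      have hfree : free = [] := by
        have h2 := hperm
        rw [hFc] at h2
        exact h2.eq_nil
      rw [hfree]
      exact (PySem.List.min?_eq_none_iff [] _).mpr rfl
  | cons f t =>
      have hfree : free ≠ [] := by
        intro h
        rw [h] at hperm
        have := hperm.symm.eq_nil
        rw [hFc] at this
        exact List.cons_ne_nil _ _ this
      cases hm : PySem.List.min? free (fun x => x) with
      | none => exact absurd ((PySem.List.min?_eq_none_iff free _).mp hm) hfree
      | some m =>
          have hmmem : m ∈ free := PySem.List.min?_mem hm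
          have hmin := PySem.List.min?_isMin hm
          have hfmem : f ∈ free := hperm.mem_iff.mpr (by rw [hFc]; exact List.mem_cons_self)
          have hmF : m ∈ F := hperm.mem_iff.mp hmmem
          have hflem : f ≤ m := by
            rw [hFc] at hmF
        -- m is f itself or in the tail, where everything exceeds f
            rcases List.mem_cons.mp hmF with h | h
            · omega
            · have := (List.pairwise_cons.mp (hFc ▸ hF)).1 m h
              omega
          have hmlef : m ≤ f := hmin f hfmem
          have : m = f := le_antisymm hmlef hflem
          rw [this, List.head?_cons]

-- covered-set fold lemmas
lemma pvAddFoldMem (ws : List Nat) :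
    ∀ (cv : PySem.Set Nat) (t : Nat),
      (t ∈ ws.foldl (fun cv k => PySem.Set.add cv k) cv) ↔ (t ∈ ws ∨ t ∈ cv) := by
  induction ws with
  | nil => intro cv t; simp
  | cons w ws ih =>
      intro cv t
      simp only [List.foldl_cons]
      rw [ih]
      rw [PySem.Set.mem_add]
      simp [List.mem_cons]
      tauto

lemma pvAddFoldNodup (ws : List Nat) :
    ∀ (cv : PySem.Set Nat), cv.Nodup → (ws.foldl (fun cv k => PySem.Set.add cv k) cv).Nodup := by
  induction ws with
  | nil => intro cv h; exact h
  | cons w ws ih => intro cv h; exact ih _ (PySem.Set.nodup_add cv w h)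

def pvRel (L : Nat) (stA : List Bool × Int) (stB : PySem.Set Nat × Int) : Prop :=
  stA.1.length = L ∧ (∀ t, stA.1.getD t false = decide (t ∈ stB.1)) ∧ stA.2 = stB.2
    ∧ stB.1.Nodup ∧ (∀ x ∈ stB.1, x < L)

lemma pvReplicateGetD (L t : Nat) : (List.replicate L false).getD t false = false := by
  rw [List.getD_eq_getElem?_getD, List.getElem?_replicate]
  split <;> rfl

lemma pvFinalEq (L : Nat) (stA : List Bool × Int) (stB : PySem.Set Nat × Int)
    (h : pvRel L stA stB) :
    (if stA.1.any (fun v => v == false) then (-1:Int) else stA.2)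
      = if PySem.Set.len stB.1 == (L : Int) then stB.2 else -1 := by
  obtain ⟨hlen, hcont, hans, hnd, hbnd⟩ := h
  have hsub : stB.1 ⊆ List.range L := by
    intro x hx
    simpa using hbnd x hx
  have hle : stB.1.length ≤ L := by
    have := (List.subperm_of_subset hnd hsub).length_le
    simpa using this
  have key : (stA.1.any (fun v => v == false) = false) ↔ stB.1.length = L := by
    constructor
    · intro hall
      rw [List.any_eq_false] at hall
      have hsup : List.range L ⊆ stB.1 := by
        intro t ht
        rw [List.mem_range] at ht
        have ht' : t < stA.1.length := by omega
        have hx := hall _ (stA.1.getElem_mem ht')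
        have hxt : stA.1.getD t false = true := by
          rw [List.getD_eq_getElem _ _ ht']
          cases hh : stA.1[t] with
          | true => rfl
          | false => rw [hh] at hx; simp at hx
        rw [hcont t] at hxt
        exact of_decide_eq_true hxt
      have hge : L ≤ stB.1.length := by
        have := (List.subperm_of_subset (List.nodup_range) hsup).length_le
        simpa using this
      omega
    · intro hlB
      rw [List.any_eq_false]
      intro x hx
      obtain ⟨t, ht, hxt⟩ := List.mem_iff_getElem.mp hx
      have hperm : stB.1.Perm (List.range L) := by
        apply (List.subperm_of_subset hnd hsub).perm_of_length_le
        simp [hlB]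
      have htB : t ∈ stB.1 := by
        rw [hperm.mem_iff]
        simp
        omega
      have hgt : stA.1.getD t false = true := by
        rw [hcont t]
        exact decide_eq_true htB
      rw [List.getD_eq_getElem _ _ ht, hxt] at hgt
      rw [hgt]
      simp
  have hlenInt : (PySem.Set.len stB.1 == (L:Int)) = (stB.1.length == L) := by
    simp [PySem.Set.len]
  rw [hlenInt]
  by_cases hany : stA.1.any (fun v => v == false) = true
  · rw [if_pos hany]
    have hne : stB.1.length ≠ L := by
      intro hl
      rw [key.mpr hl] at hany
      exact Bool.false_ne_true hany
    rw [if_neg (by simpa using hne)]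
  · have hf : stA.1.any (fun v => v == false) = false := by
      cases hb : stA.1.any (fun v => v == false)
      · rfl
      · exact absurd hb hany
    rw [if_neg hany, if_pos (by simpa using key.mp hf)]
    exact hans

lemma pvFoldlRel {σ τ α : Type} (R : σ → τ → Prop) (f : σ → α → σ) (g : τ → α → τ) :
    ∀ (l : List α) (s : σ) (t : τ), R s t →
      (∀ s t a, R s t → a ∈ l → R (f s a) (g t a)) →
      R (l.foldl f s) (l.foldl g t) := by
  intro l
  induction l with
  | nil => intro s t h _; exact h
  | cons a l ih =>
      intro s t h hstep
      exact ih (f s a) (g t a) (hstep s t a h List.mem_cons_self)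
        (fun s t b hb hmem => hstep s t b hb (List.mem_cons_of_mem _ hmem))

-- one friend step: A's index-order search equals B's min over eligible free candidates
lemma pvStepEq (L len : Nat) (hL : 0 < L) (hlen : len < L) (S : Nat → Int)
    (sortedCand : List (Int × Nat))
    (hperm : sortedCand.Perm ((List.range L).map (fun i => (S i, i))))
    (hsorted : sortedCand.Pairwise (fun a b => a.1 ≤ b.1))
    (cA : Nat → Int) (hc : ∀ i, i < L → cA i = S i)
    (d : Int) (v : List Bool) (a : Int) (cv : PySem.Set Nat) (b : Int)
    (hR : pvRel L (v, a) (cv, b)) :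
    pvRel L
      (match (List.range L).find? (fun i =>
          decide (cA i ≤ d) && isOK v i (i + len + 1)) with
       | some i => (setTrue v i (i + len + 1), a + 1)
       | none => (v, a))
      (match PySem.List.min?
          (((sortedCand.takeWhile (fun c => decide (c.1 ≤ d))).map Prod.snd).filter
            (fun i => (List.range (len + 1)).all
              (fun k => !(PySem.Set.contains cv ((i + k) % L))))) (fun x => x) with
       | some i => ((List.range (len + 1)).foldl
            (fun cv k => PySem.Set.add cv ((i + k) % L)) cv, b + 1)
       | none => (cv, b)) := by
  obtain ⟨hlenv, hcont, hans, hnd, hbnd⟩ := hR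
  -- the two predicates agree on range L
  set q : Nat → Bool := fun i =>
    (List.range (len + 1)).all (fun k => !(PySem.Set.contains cv ((i + k) % L))) with hq
  have hcb : ∀ u, PySem.Set.contains cv u = decide (u ∈ cv) := by
    intro u
    by_cases h : u ∈ cv
    · rw [decide_eq_true h, (PySem.Set.contains_iff cv u).mpr h]
    · rw [decide_eq_false h]
      cases hcc : PySem.Set.contains cv u
      · rfl
      · exact absurd ((PySem.Set.contains_iff cv u).mp hcc) h
  have hpredEq : ∀ i ∈ List.range L,
      (decide (cA i ≤ d) && isOK v i (i + len + 1)) = (decide (S i ≤ d) && q i) := by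
    intro i hi
    rw [List.mem_range] at hi
    rw [hc i hi, pvIsOKWindow v L i len hlenv hi hlen]
    have hwq : ((List.range (len+1)).map (fun k => (i + k) % L)).all
        (fun t => !(v.getD t false)) = q i := by
      rw [hq]
      simp only [List.all_map]
      congr 1
      funext k
      simp only [Function.comp]
      rw [hcont ((i + k) % L), hcb ((i + k) % L)]
    rw [hwq]
  -- A's find? equals head of the ascending filtered range
  set F : List Nat := (List.range L).filter (fun i => decide (S i ≤ d) && q i) with hF
  have hfind : (List.range L).find? (fun i =>
      decide (cA i ≤ d) && isOK v i (i + len + 1)) = F.head? := by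
    rw [pvFindCongr _ _ _ hpredEq, pvFindEqHeadFilter]
  -- B's free list is a permutation of F
  have hfreePerm :
      (((sortedCand.takeWhile (fun c => decide (c.1 ≤ d))).map Prod.snd).filter q).Perm F := by
    rw [pvTakeWhileEqFilter d sortedCand hsorted]
    have h1 : (sortedCand.filter (fun c => decide (c.1 ≤ d))).Perm
        (((List.range L).map (fun i => (S i, i))).filter (fun c => decide (c.1 ≤ d))) :=
      hperm.filter _
    have h2 := (h1.map Prod.snd).filter q
    refine h2.trans ?_
    apply List.Perm.of_eq
    simp only [List.filter_map, List.map_map, List.filter_filter, Function.comp]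
    rw [hF, show (Prod.snd ∘ fun i : Nat => (S i, i)) = id from rfl, List.map_id]
    apply List.filter_congr
    intro i _
    exact Bool.and_comm _ _
  have hFsorted : F.Pairwise (· < ·) := List.Pairwise.filter _ (List.pairwise_lt_range)
  have hmin := pvMinPerm _ F hfreePerm hFsorted
  rw [hfind, hmin]
  cases hhead : F.head? with
  | none => exact ⟨hlenv, hcont, hans, hnd, hbnd⟩
  | some i =>
      have hiL : i < L := by
        have : i ∈ F := List.mem_of_mem_head? hhead
        rw [hF] at this
        have := List.mem_of_mem_filter this
        simpa using this
      simp only []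
      set ws : List Nat := (List.range (len + 1)).map (fun k => (i + k) % L) with hws
      have hwsb : ∀ w ∈ ws, w < L := by
        intro w hw
        rw [hws] at hw
        simp only [List.mem_map] at hw
        obtain ⟨k, _, hk⟩ := hw
        rw [← hk]
        exact Nat.mod_lt _ hL
      have hfold : (List.range (len + 1)).foldl
            (fun cv k => PySem.Set.add cv ((i + k) % L)) cv
          = ws.foldl (fun cv k => PySem.Set.add cv k) cv := by
        rw [hws, List.foldl_map]
      rw [pvSetTrueWindow v L i len hlenv hiL hlen]
      refine ⟨by rw [← hws, pvMarkLen]; exact hlenv, ?_, by simpa using hans, ?_, ?_⟩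
      · intro t
        rw [← hws, pvMarkGetD ws v (fun w hw => hlenv ▸ hwsb w hw) t, hcont t]
        show _ = decide (t ∈ (List.range (len + 1)).foldl
            (fun cv k => PySem.Set.add cv ((i + k) % L)) cv)
        rw [hfold]
        have hmem := pvAddFoldMem ws cv t
        by_cases h1 : t ∈ ws <;> by_cases h2 : t ∈ cv <;> simp [h1, h2, hmem]
      · show ((List.range (len + 1)).foldl
            (fun cv k => PySem.Set.add cv ((i + k) % L)) cv).Nodup
        rw [hfold]
        exact pvAddFoldNodup ws cv hnd
      · intro x hx
        rw [show ((List.range (len + 1)).foldl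
            (fun cv k => PySem.Set.add cv ((i + k) % L)) cv, b + 1).1
          = ws.foldl (fun cv k => PySem.Set.add cv k) cv from hfold] at hx
        rcases (pvAddFoldMem ws cv x).mp hx with h | h
        · exact hwsb x h
        · exact hbnd x h

-- the friends fold: custom induction carrying the pop-while pointer invariant
lemma pvInnerFold (L len : Nat) (hL : 0 < L) (hlen : len < L) (S : Nat → Int)
    (sortedCand : List (Int × Nat))
    (hperm : sortedCand.Perm ((List.range L).map (fun i => (S i, i))))
    (hsorted : sortedCand.Pairwise (fun a b => a.1 ≤ b.1))
    (cA : Nat → Int) (hc : ∀ i, i < L → cA i = S i) :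
    ∀ (fs : List Int), fs.Pairwise (· ≤ ·) →
    ∀ (v : List Bool) (a : Int) (cv : PySem.Set Nat) (b : Int) (p : Int × Nat → Bool),
      pvRel L (v, a) (cv, b) →
      (∀ c, p c = true → ∀ d' ∈ fs, c.1 ≤ d') →
      pvRel L
        (fs.foldl (fun (st : List Bool × Int) d =>
          match (List.range L).find? (fun i =>
              decide (cA i ≤ d) && isOK st.1 i (i + len + 1)) with
          | some i => (setTrue st.1 i (i + len + 1), st.2 + 1)
          | none => st) (v, a))
        ((fs.foldl (fun (r : (List (Int × Nat) × List Nat) × PySem.Set Nat × Int) d =>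
            let ce := popWhileLe r.1.1 r.1.2 d
            let free := ce.2.filter (fun i =>
                (List.range (len + 1)).all
                  (fun k => !(PySem.Set.contains r.2.1 ((i + k) % L))))
            match PySem.List.min? free (fun x => x) with
            | some i => (ce,
                ((List.range (len + 1)).foldl
                  (fun cv k => PySem.Set.add cv ((i + k) % L)) r.2.1, r.2.2 + 1))
            | none => (ce, r.2))
          ((sortedCand.dropWhile p, (sortedCand.takeWhile p).map Prod.snd), cv, b)).2) := by
  intro fs
  induction fs with
  | nil => intro _ v a cv b p hR _; exact hR
  | cons d fs ih =>
      intro hpair v a cv b p hR hp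
      obtain ⟨hd, hpair'⟩ := List.pairwise_cons.mp hpair
      simp only [List.foldl_cons]
      -- rewrite the popWhileLe step via the split identities
      have himp : ∀ c, p c = true → (fun c => decide (c.1 ≤ d)) c = true := by
        intro c hc
        simp only [decide_eq_true_eq]
        exact hp c hc d List.mem_cons_self
      have hpop : popWhileLe (sortedCand.dropWhile p) ((sortedCand.takeWhile p).map Prod.snd) d
          = (sortedCand.dropWhile (fun c => decide (c.1 ≤ d)),
             (sortedCand.takeWhile (fun c => decide (c.1 ≤ d))).map Prod.snd) := by
        rw [pvPopWhileLeSpec]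
        refine Prod.ext ?_ ?_
        · simp only []
          rw [← pvDropWhileSplit p _ himp]
        · simp only []
          rw [← List.map_append, ← pvTakeWhileSplit p _ himp]
      rw [hpop]
      have hstep := pvStepEq L len hL hlen S sortedCand hperm hsorted cA hc d v a cv b hR
      -- both matches step in sync; name the new states
      cases hm : PySem.List.min?
          (((sortedCand.takeWhile (fun c => decide (c.1 ≤ d))).map Prod.snd).filter
            (fun i => (List.range (len + 1)).all
              (fun k => !(PySem.Set.contains cv ((i + k) % L))))) (fun x => x) with
      | none =>
          rw [hm] at hstep
          -- A side also takes the none branch implicitly inside hstep; use ih with new p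
          have := ih hpair' _ _ _ _ (fun c => decide (c.1 ≤ d))
            (by simpa [hm] using hstep)
            (by
              intro c hc d' hd'
              have h1 : c.1 ≤ d := of_decide_eq_true hc
              have h2 : d ≤ d' := hd d' hd'
              omega)
          simpa [hm] using this
      | some i =>
          rw [hm] at hstep
          have := ih hpair' _ _ _ _ (fun c => decide (c.1 ≤ d))
            (by simpa [hm] using hstep)
            (by
              intro c hc d' hd'
              have h1 : c.1 ≤ d := of_decide_eq_true hc
              have h2 : d ≤ d' := hd d' hd'
              omega)
          simpa [hm] using this

lemma pvTakeFalse {α : Type} : ∀ l : List α, l.takeWhile (fun _ => false) = [] := by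
  intro l
  cases l <;> simp [List.takeWhile]

lemma pvDropFalse {α : Type} : ∀ l : List α, l.dropWhile (fun _ => false) = l := by
  intro l
  cases l <;> simp [List.dropWhile]

lemma pvMain (n : Int) (weak : List Int) (dist : List Int) (hw : weak ≠ []) :
    solution n weak dist = solution_alt n weak dist := by
  have hL : 0 < weak.length := List.length_pos_iff.mpr hw
  set L := weak.length with hLdef
  set wd : List Int := ((List.range (L - 1)).map (fun i => weak.getD (i+1) 0 - weak.getD i 0))
      ++ [weak.getD 0 0 + n - weak.getD (L - 1) 0] with hwd
  have hwdlen : wd.length = L := by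
    rw [hwd]; simp; omega
  unfold solution solution_alt
  simp only [pvFoldlAppendMap, List.nil_append, ← hLdef, ← hwd]
  apply pvFinalEq L
  apply pvFoldlRel (pvRel L)
  · refine ⟨by simp, fun t => by rw [pvReplicateGetD]; simp [PySem.Set.empty], rfl, by
      simp [PySem.Set.empty], by simp [PySem.Set.empty]⟩
  · intro sA sB len hR hlenmem
    have hlen : len < L := by
      rw [List.mem_reverse, List.mem_range] at hlenmem
      exact hlenmem
    obtain ⟨v, a⟩ := sA
    obtain ⟨cv, b⟩ := sB
    -- characterize B's candidate list
    have hslice : PySem.List.slice wd none (some (len : Int)) = wd.take len :=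
      PySem.List.slice_to_natCast wd len
    have hs0 : (wd.take len).sum = pvSumS wd L 0 len :=
      pvTakeSum wd L len (by omega) (by omega)
    have hcand := pvCandFold wd L len L le_rfl
    simp only [hslice, hs0]
    rw [hcand]
    simp only []
    -- apply the inner fold lemma with initial pointer predicate `false`
    have hinner := pvInnerFold L len hL hlen (fun i => pvSumS wd L i len)
      (PySem.List.sorted ((List.range L).map (fun i => (pvSumS wd L i len, i)))
        (fun c => c.1) false)
      (PySem.List.sorted_perm _ _ _)
      (PySem.List.sorted_pairwise _ _)
      (fun i => (((List.range L).foldl (fun sd i =>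
          (List.range' 1 (L - 1)).foldl (fun sd j =>
            sd.set i ((sd.getD i []).set j
              (((sd.getD i []).getD (j-1) 0) + wd.getD (getNextIndex i j L) 0))) sd)
          ((List.range L).map (fun _ => (List.range L).map (fun _ => (0:Int))))).getD i []).getD len 0)
      (fun i hi => pvTableGetD wd L i len hi (by omega))
      (PySem.List.sorted dist (fun x => x) false)
      (PySem.List.sorted_pairwise _ _)
      v a cv b (fun _ => false) hR (by intro c hc; exact absurd hc (by simp))
    simpa [pvTakeFalse, pvDropFalse] using hinner

-- ===== VERDICT (by name: the statement is the Claim_ definition above) =====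
theorem solution_spec : Claim_equal_solution := by
  intro n weak dist _ hpre
  unfold Spec_solution
  exact pvMain n weak dist hpre
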